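-- pv_equiv track=rewrite | github.com/Sokwva/NetDevRExecEngine | utils/macAddrUtils.py | eightToFourPart
-- ===== SOURCE A (Python) =====
-- def eightToFourPart(split: str,raw: str):
--     x = raw.replace(split, "")
--     y = []
--     e = 0
--     for t in x:
--         if e % 4 == 0 and e != 0:
--             y.append("-")
--         y.append(t)
--         e += 1
--     return "".join(y)
-- ===== SOURCE B (Python) =====
-- def eightToFourPart(split: str, raw: str):
--     x = raw.replace(split, "")
--     parts = []
--     i = 0
--     while i < len(x):
--         parts.append(x[i:i+4])
--         i += 4
--     return "-".join(parts)
-- ===== Notes on version B (the rewrite author's own statement) =====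
-- stated objective: idiomatic
-- what changed: Instead of a per-character loop with a modulo counter and explicit dash insertion, B slices the cleaned string into 4-character blocks (advancing an index by 4) and joins them with '-', so join handles separator placement.
import Mathlib
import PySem

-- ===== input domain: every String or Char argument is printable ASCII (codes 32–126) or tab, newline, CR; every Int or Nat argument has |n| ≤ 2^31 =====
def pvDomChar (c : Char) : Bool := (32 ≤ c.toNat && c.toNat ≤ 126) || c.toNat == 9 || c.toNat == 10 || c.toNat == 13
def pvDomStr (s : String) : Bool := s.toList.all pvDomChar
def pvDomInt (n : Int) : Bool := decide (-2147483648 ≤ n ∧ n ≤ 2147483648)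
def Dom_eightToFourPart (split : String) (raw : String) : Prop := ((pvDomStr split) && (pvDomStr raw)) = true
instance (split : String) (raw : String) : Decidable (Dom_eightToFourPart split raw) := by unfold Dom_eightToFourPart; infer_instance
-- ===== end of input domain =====

-- B replaces A's per-character loop (modulo counter, explicit dash insertion) by slicing the
-- cleaned string into 4-character blocks and joining them with "-" (objective: idiomatic).


-- ===== PORT A =====
-- the loop body: y gets "-" appended when e % 4 == 0 and e != 0, then the character, e += 1
def eightToFourPartStep (acc : List String × Int) (t : Char) : List String × Int :=
  let y := if PySem.Int.mod acc.2 4 = 0 ∧ acc.2 ≠ 0 then acc.1 ++ ["-"] else acc.1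
  (y ++ [String.ofList [t]], acc.2 + 1)

def eightToFourPart (split : String) (raw : String) : String :=
  let x := PySem.Str.replace raw split ""
  let r := x.toList.foldl eightToFourPartStep ([], 0)
  PySem.Str.join "" r.1

-- ===== PORT B =====
-- the while loop of Source B: while i < len(x), append x[i:i+4] and advance i by 4
def eightToFourPartChunksI (x : List Char) (i : Int) : List String :=
  if h : i < (x.length : Int) then
    String.ofList (PySem.List.slice x (some i) (some (i + 4))) ::
    eightToFourPartChunksI x (i + 4)
  else []
termination_by ((x.length : Int) - i).toNat
decreasing_by omega

def eightToFourPart_alt (split : String) (raw : String) : String :=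
  let x := PySem.Str.replace raw split ""
  PySem.Str.join "-" (eightToFourPartChunksI x.toList 0)

-- ===== PRECONDITION & SPEC =====
def Spec_eightToFourPart (split : String) (raw : String) (out : String) : Prop := out = eightToFourPart_alt split raw
instance (split : String) (raw : String) (out : String) : Decidable (Spec_eightToFourPart split raw out) := by unfold Spec_eightToFourPart; infer_instance

-- ===== CLAIM (what is proved, stated in full; the proofs are below) =====
def Claim_equal_eightToFourPart : Prop := ∀ (split : String) (raw : String), Dom_eightToFourPart split raw → Spec_eightToFourPart split raw (eightToFourPart split raw)

-- ===== LEMMAS AND PROOFS =====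

-- reference form of A's accumulated list: a dash (iff dash is set) then the first 4 chars
-- as singleton strings, then recursively the rest with the dash set
def partsFrom (dash : Bool) (cs : List Char) : List String :=
  if h : cs = [] then []
  else (if dash then ["-"] else []) ++ (cs.take 4).map (fun c => String.ofList [c]) ++
       partsFrom true (cs.drop 4)
termination_by cs.length
decreasing_by
  cases cs with
  | nil => exact absurd rfl h
  | cons a t => simp

theorem partsFrom_nil (dash : Bool) : partsFrom dash [] = [] := by
  rw [partsFrom]; simp

theorem partsFrom_ne_nil (dash : Bool) (cs : List Char) (h : cs ≠ []) :
    partsFrom dash cs =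
      (if dash then ["-"] else []) ++ (cs.take 4).map (fun c => String.ofList [c]) ++
      partsFrom true (cs.drop 4) := by
  rw [partsFrom]; simp [h]

-- proof-side reference: chunking by repeated take/drop
def chunksDrop (cs : List Char) : List String :=
  if h : cs = [] then []
  else String.ofList (cs.take 4) :: chunksDrop (cs.drop 4)
termination_by cs.length
decreasing_by
  cases cs with
  | nil => exact absurd rfl h
  | cons a t => simp

theorem chunksDrop_nil : chunksDrop [] = [] := by
  rw [chunksDrop]; simp

theorem chunksDrop_ne_nil (cs : List Char) (h : cs ≠ []) :
    chunksDrop cs = String.ofList (cs.take 4) :: chunksDrop (cs.drop 4) := by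
  rw [chunksDrop]; simp [h]

-- B's index loop is the take/drop chunking of the not-yet-consumed suffix
theorem chunksI_eq_chunksDrop (x : List Char) (i : Nat) :
    eightToFourPartChunksI x (i : Int) = chunksDrop (x.drop i) := by
  rw [eightToFourPartChunksI]
  by_cases h : (i : Int) < (x.length : Int)
  · rw [dif_pos h]
    have hd : x.drop i ≠ [] := by
      have : (x.drop i).length ≠ 0 := by rw [List.length_drop]; omega
      exact fun hc => this (by rw [hc]; rfl)
    rw [chunksDrop_ne_nil _ hd]
    have h4 : ((i : Int) + 4) = ((i : Int) + ((4 : Nat) : Int)) := by norm_num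
    have hstep : ((i : Int) + ((4 : Nat) : Int)) = (((i + 4 : Nat)) : Int) := by push_cast; ring
    rw [h4, PySem.List.slice_natCast_add]
    rw [hstep, chunksI_eq_chunksDrop x (i + 4), List.drop_drop]
  · rw [dif_neg h]
    have : x.drop i = [] := List.drop_eq_nil_of_le (by omega)
    rw [this, chunksDrop_nil]
termination_by x.length - i
decreasing_by omega

-- one block of at most 4 characters through A's loop: a dash iff m ≠ 0, then the characters
theorem foldl_block (b : List Char) (m : Nat) (y : List String)
    (hne : b ≠ []) (hle : b.length ≤ 4) :
    b.foldl eightToFourPartStep (y, (4 * (m : Int))) =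
      (y ++ (if m = 0 then [] else ["-"]) ++ b.map (fun c => String.ofList [c]),
       4 * (m : Int) + (b.length : Int)) := by
  have h0 : (4 : Int) ∣ 4 * (m : Int) := ⟨m, by ring⟩
  have h1 : ¬ (4 : Int) ∣ (4 * (m : Int) + 1) := by omega
  have h2 : ¬ (4 : Int) ∣ (4 * (m : Int) + 1 + 1) := by omega
  have h3 : ¬ (4 : Int) ∣ (4 * (m : Int) + 1 + 1 + 1) := by omega
  have hziff : (4 * (m : Int) = 0) ↔ (m = 0) := by omega
  match b, hne, hle with
  | [], hne, _ => exact absurd rfl hne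
  | a :: b2 :: c :: d :: e :: rest, _, hle => exact absurd hle (by simp)
  | [a], _, _ | [a, b2], _, _ | [a, b2, c], _, _ | [a, b2, c, d], _, _ =>
    by_cases hm0 : m = 0 <;>
      simp [List.foldl, eightToFourPartStep, h0, h1, h2, h3, hziff, hm0] <;> omega

-- A's whole loop, block by block
theorem foldl_partsFrom : ∀ (n : Nat) (cs : List Char), cs.length ≤ n → ∀ (m : Nat) (y : List String),
    cs.foldl eightToFourPartStep (y, (4 * (m : Int))) =
      (y ++ partsFrom (m ≠ 0) cs, 4 * (m : Int) + (cs.length : Int)) := by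
  intro n
  induction n with
  | zero =>
    intro cs hcs m y
    have : cs = [] := List.eq_nil_of_length_eq_zero (by omega)
    subst this; simp [partsFrom_nil]
  | succ n ih =>
    intro cs hcs m y
    by_cases hnil : cs = []
    · subst hnil; simp [partsFrom_nil]
    · have hsplit := List.take_append_drop 4 cs
      have htne : cs.take 4 ≠ [] := by
        cases cs with
        | nil => exact absurd rfl hnil
        | cons a t => simp
      have htle : (cs.take 4).length ≤ 4 := by simp
      rw [partsFrom_ne_nil _ _ hnil]
      conv_lhs => rw [← hsplit]
      rw [List.foldl_append, foldl_block _ m y htne htle]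
      by_cases hd : cs.drop 4 = []
      · rw [hd]
        simp only [List.foldl, partsFrom_nil]
        have hle4 : cs.length ≤ 4 := List.drop_eq_nil_iff.mp hd
        have hlen : (cs.take 4).length = cs.length := by
          rw [List.length_take]; omega
        rw [hlen]
        by_cases hm0 : m = 0 <;> simp [hm0]
      · have h4 : (cs.take 4).length = 4 := by
          have : 4 ≤ cs.length := by
            by_contra hlt
            exact hd (List.drop_eq_nil_of_le (by omega))
          simp [this]
        rw [h4]
        have hcast : (4 * (m : Int) + ((4 : Nat) : Int)) = (4 * ((m + 1 : Nat) : Int)) := by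
          push_cast; ring
        rw [hcast, ih (cs.drop 4) (by rw [List.length_drop]; omega) (m + 1)]
        have hlen : 4 * (((m + 1 : Nat)) : Int) + ((cs.drop 4).length : Int)
            = 4 * (m : Int) + (cs.length : Int) := by
          rw [List.length_drop]
          have : 4 ≤ cs.length := by
            by_contra hlt
            exact hd (List.drop_eq_nil_of_le (by omega))
          push_cast; omega
        rw [hlen]
        by_cases hm0 : m = 0 <;> simp [hm0]

-- joins
theorem join_nil_flatten (parts : List (List Char)) :
    PySem.Chars.join [] parts = parts.flatten := by
  induction parts with
  | nil => rfl
  | cons a rest ih =>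
    cases rest with
    | nil => simp [PySem.Chars.join_singleton]
    | cons b r =>
      rw [PySem.Chars.join_cons_cons]
      simp only [List.flatten_cons] at ih ⊢
      rw [ih]; simp

theorem join_dash_cons (a : List Char) (rest : List (List Char)) :
    PySem.Chars.join ['-'] (a :: rest) =
      a ++ (if rest = [] then [] else '-' :: PySem.Chars.join ['-'] rest) := by
  cases rest with
  | nil => simp [PySem.Chars.join_singleton]
  | cons b r => rw [PySem.Chars.join_cons_cons]; simp

-- the two shapes produce the same characters
theorem parts_eq_chunks : ∀ (n : Nat) (cs : List Char), cs.length ≤ n → ∀ (dash : Bool),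
    PySem.Chars.join [] ((partsFrom dash cs).map String.toList) =
      (if dash ∧ cs ≠ [] then ['-'] else []) ++
      PySem.Chars.join ['-'] ((chunksDrop cs).map String.toList) := by
  intro n
  induction n with
  | zero =>
    intro cs hcs dash
    have : cs = [] := List.eq_nil_of_length_eq_zero (by omega)
    subst this
    simp [partsFrom_nil, chunksDrop_nil, PySem.Chars.join, List.intercalate]
  | succ n ih =>
    intro cs hcs dash
    by_cases hnil : cs = []
    · subst hnil
      simp [partsFrom_nil, chunksDrop_nil, PySem.Chars.join, List.intercalate]
    · rw [partsFrom_ne_nil _ _ hnil, chunksDrop_ne_nil _ hnil]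
      rw [join_nil_flatten]
      simp only [List.map_append, List.flatten_append, List.map_cons, join_dash_cons]
      have ihd := ih (cs.drop 4) (by
        rw [List.length_drop]
        cases cs with
        | nil => exact absurd rfl hnil
        | cons a t => simp at hcs ⊢; omega) true
      rw [join_nil_flatten] at ihd
      have hflat : ∀ l : List Char,
          ((l.map (fun c => String.ofList [c])).map String.toList).flatten = l := by
        intro l; induction l with
        | nil => rfl
        | cons a t iht => simp at iht ⊢; exact iht
      rw [hflat]
      by_cases hd : cs.drop 4 = []
      · rw [hd] at ihd ⊢
        simp only [chunksDrop_nil, partsFrom_nil, List.map_nil, List.flatten_nil,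
          List.append_nil] at ihd ⊢
        by_cases hdash : dash = true <;> simp [hdash, hnil]
      · have hcne : chunksDrop (cs.drop 4) ≠ [] := by
          rw [chunksDrop_ne_nil _ hd]; simp
        simp only [hd, ne_eq, not_false_iff, true_and] at ihd
        rw [ihd]
        have hmapne : (chunksDrop (cs.drop 4)).map String.toList ≠ [] := by
          simp [hcne]
        rw [if_neg hmapne]
        by_cases hdash : dash = true <;> simp [hdash, hnil]

-- ===== VERDICT (by name: the statement is the Claim_ definition above) =====
theorem eightToFourPart_spec : Claim_equal_eightToFourPart := by
  intro split raw _
  unfold Spec_eightToFourPart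
  simp only [eightToFourPart, eightToFourPart_alt]
  apply String.toList_inj.mp
  have hfold := foldl_partsFrom ((PySem.Str.replace raw split "").toList.length)
    ((PySem.Str.replace raw split "").toList) le_rfl 0 []
  have hch := chunksI_eq_chunksDrop ((PySem.Str.replace raw split "").toList) 0
  simp only [Nat.cast_zero, mul_zero, zero_add, List.nil_append, List.drop_zero,
    ne_eq, decide_not] at hfold hch
  rw [hfold, hch]
  rw [PySem.Str.toList_join, PySem.Str.toList_join]
  have := parts_eq_chunks ((PySem.Str.replace raw split "").toList.length)
    ((PySem.Str.replace raw split "").toList) le_rfl false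
  simpa using this
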